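-- pv_equiv track=rewrite | github.com/mtsochacki/advent-of-code-2022-python | src/day08.py | look_from_top
-- ===== SOURCE A (Python) =====
-- def look_from_top(list_of_trees):
--     set = {(0, 0)}
--     for x in range(len(list_of_trees[0])):
--         tallest_tree = -1
--         for y in range(len(list_of_trees[x])):
--             if int(list_of_trees[y][x]) > tallest_tree:
--                 set.add((x, y))
--                 tallest_tree = int(list_of_trees[y][x])
--     return set
-- ===== SOURCE B (Python) =====
-- def look_from_top(list_of_trees):
--     def max_above(x, y):
--         return max((int(list_of_trees[k][x]) for k in range(y)), default=-1)
--     return {(0, 0)} | {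
--         (x, y)
--         for x in range((len(list_of_trees[0])))
--         for y in range(len(list_of_trees[x]))
--         if int(list_of_trees[y][x]) > max_above(x, y)
--     }
-- ===== Notes on version B (the rewrite author's own statement) =====
-- stated objective: alternative
-- what changed: Replaces A's stateful double loop with a running-maximum accumulator by a single set comprehension: a cell is visible iff its height exceeds the maximum (default -1) of all trees above it in its column, recomputed fresh per cell, then unioned with {(0,0)}.
import Mathlib
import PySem

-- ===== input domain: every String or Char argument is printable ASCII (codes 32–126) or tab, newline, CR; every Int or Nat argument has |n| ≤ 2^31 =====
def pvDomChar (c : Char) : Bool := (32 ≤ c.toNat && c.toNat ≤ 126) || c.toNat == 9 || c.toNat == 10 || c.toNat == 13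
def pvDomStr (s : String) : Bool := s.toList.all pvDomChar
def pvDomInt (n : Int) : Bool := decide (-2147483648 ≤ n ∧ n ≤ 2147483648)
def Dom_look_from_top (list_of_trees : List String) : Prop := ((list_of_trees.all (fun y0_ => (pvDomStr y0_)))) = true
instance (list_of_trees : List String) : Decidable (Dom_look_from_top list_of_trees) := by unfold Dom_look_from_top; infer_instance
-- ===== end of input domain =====

-- B replaces A's stateful double loop (running-maximum accumulator) by a single set
-- comprehension: a cell is visible iff its height exceeds the max (default -1) of the trees
-- above it in its column; the result is {(0,0)} ∪ that comprehension (alternative, not faster).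

-- int(list_of_trees[y][x]) — shared by both ports; total form of the indexing, exact under Pre_
def intAt (list_of_trees : List String) (y x : Int) : Int :=
  (PySem.Int.ofChars? [PySem.List.pyGetD (PySem.List.pyGetD list_of_trees y "").toList x ' ']).getD 0

-- ===== PORT A =====
def look_from_top (list_of_trees : List String) : List (Int × Int) :=
  (PySem.List.pyRange 0 (PySem.Str.len (PySem.List.pyGetD list_of_trees 0 "")) 1).foldl
    (fun (s : PySem.Set (Int × Int)) x =>
      ((PySem.List.pyRange 0 (PySem.Str.len (PySem.List.pyGetD list_of_trees x "")) 1).foldl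
        (fun (st : PySem.Set (Int × Int) × Int) y =>
          if intAt list_of_trees y x > st.2
          then (PySem.Set.add st.1 (x, y), intAt list_of_trees y x)
          else st)
        (s, -1)).1)
    (PySem.Set.ofList [((0 : Int), (0 : Int))])

-- ===== PORT B =====
-- max_above(x, y) = max of the column-x heights strictly above row y, default -1
def maxAbove (list_of_trees : List String) (x y : Int) : Int :=
  PySem.List.maxD ((PySem.List.pyRange 0 y 1).map (fun k => intAt list_of_trees k x))
    (fun v => v) (-1)

def look_from_top_alt (list_of_trees : List String) : List (Int × Int) :=
  PySem.Set.union (PySem.Set.ofList [((0 : Int), (0 : Int))])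
    ((PySem.List.pyRange 0 (PySem.Str.len (PySem.List.pyGetD list_of_trees 0 "")) 1).flatMap
      (fun x =>
        ((PySem.List.pyRange 0 (PySem.Str.len (PySem.List.pyGetD list_of_trees x "")) 1).filter
          (fun y => intAt list_of_trees y x > maxAbove list_of_trees x y)).map
          (fun y => (x, y))))

-- ===== PRECONDITION & SPEC =====
-- Pre_: exactly the inputs on which Python A returns (no IndexError from the ragged indexing,
-- no ValueError from int(): every visited cell exists and holds a decimal digit)
def Pre_look_from_top (list_of_trees : List String) : Prop :=
  list_of_trees ≠ [] ∧
  ∀ x < (list_of_trees.getD 0 "").toList.length, x < list_of_trees.length ∧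
    ∀ y < (list_of_trees.getD x "").toList.length, y < list_of_trees.length ∧
      x < (list_of_trees.getD y "").toList.length ∧
      ((list_of_trees.getD y "").toList.getD x ' ').isDigit = true
instance (list_of_trees : List String) : Decidable (Pre_look_from_top list_of_trees) := by
  unfold Pre_look_from_top; infer_instance
def pvWitness_look_from_top : List String := ["21", "12"]
def Spec_look_from_top (list_of_trees : List String) (out : List (Int × Int)) : Prop := out = look_from_top_alt list_of_trees
instance (list_of_trees : List String) (out : List (Int × Int)) : Decidable (Spec_look_from_top list_of_trees out) := by unfold Spec_look_from_top; infer_instance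

-- ===== CLAIM (what is proved, stated in full; the proofs are below) =====
def Claim_equal_look_from_top : Prop := ∀ (list_of_trees : List String), Dom_look_from_top list_of_trees → Pre_look_from_top list_of_trees → Spec_look_from_top list_of_trees (look_from_top list_of_trees)

-- ===== LEMMAS AND PROOFS =====

-- int() of a single decimal digit character
theorem ofChars?_digit (c : Char) (h : c.isDigit = true) :
    PySem.Int.ofChars? [c] = some ((c.toNat : Int) - 48) := by
  have h1 : 48 ≤ c.toNat ∧ c.toNat ≤ 57 := by
    simp [Char.isDigit] at h
    have h2 := h.1; have h3 := h.2
    exact ⟨by exact_mod_cast UInt32.le_iff_toNat_le.mp h2,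
           by exact_mod_cast UInt32.le_iff_toNat_le.mp h3⟩
  have henum : c.toNat = 48 ∨ c.toNat = 49 ∨ c.toNat = 50 ∨ c.toNat = 51 ∨ c.toNat = 52 ∨
      c.toNat = 53 ∨ c.toNat = 54 ∨ c.toNat = 55 ∨ c.toNat = 56 ∨ c.toNat = 57 := by omega
  rcases henum with h|h|h|h|h|h|h|h|h|h <;>
    (have hc := Char.ofNat_toNat c; rw [h] at hc; rw [← hc]; decide)

-- max(l + [a], default=-1) as a running-max step (for -1 ≤ a)
def maxStep (acc : Option Int) (x : Int) : Option Int :=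
  match acc with
  | none => some x
  | some m => if m < x then some x else some m

theorem max?_eq_foldl_maxStep (l : List Int) :
    PySem.List.max? l (fun v => v) = List.foldl maxStep none l := by
  simp only [PySem.List.max?]
  exact PySem.List.foldl_congr_mem l _ _ none (fun acc x _ => by cases acc <;> rfl)

theorem maxD_append_singleton (l : List Int) (a : Int) (ha : -1 ≤ a) :
    PySem.List.maxD (l ++ [a]) (fun v => v) (-1) =
      if PySem.List.maxD l (fun v => v) (-1) < a then a
      else PySem.List.maxD l (fun v => v) (-1) := by
  simp only [PySem.List.maxD, max?_eq_foldl_maxStep, List.foldl_append, List.foldl_cons,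
    List.foldl_nil]
  generalize List.foldl maxStep none l = F
  cases F with
  | none => simp only [maxStep, Option.getD]; split_ifs <;> omega
  | some m => simp only [maxStep, Option.getD]; split_ifs <;> rfl

-- the inner column loop: A's running max is the max of the prefix above, so A's inner pair
-- fold has the same set component as the stateless "compare with maxAbove" conditional fold
theorem inner_loop (ts : List String) (x : Int) (m : Nat)
    (hnn : ∀ k : Nat, k < m → 0 ≤ intAt ts (k : Int) x) :
    ∀ s : PySem.Set (Int × Int),
    (PySem.List.pyRange 0 (m : Int) 1).foldl
        (fun (st : PySem.Set (Int × Int) × Int) y =>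
          if intAt ts y x > st.2 then (PySem.Set.add st.1 (x, y), intAt ts y x) else st)
        (s, -1)
      = ((PySem.List.pyRange 0 (m : Int) 1).foldl
          (fun (s : PySem.Set (Int × Int)) y =>
            if intAt ts y x > maxAbove ts x y then PySem.Set.add s (x, y) else s)
          s,
        maxAbove ts x (m : Int)) := by
  induction m with
  | zero =>
    intro s
    have h0 : PySem.List.pyRange 0 ((0 : Nat) : Int) 1 = [] := by decide
    rw [h0]
    simp [maxAbove, PySem.List.maxD, PySem.List.max?]
  | succ n ih =>
    intro s
    have hsplit : PySem.List.pyRange 0 ((n + 1 : Nat) : Int) 1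
        = PySem.List.pyRange 0 (n : Int) 1 ++ [(n : Int)] := by
      have : ((n + 1 : Nat) : Int) = (n : Int) + 1 := by push_cast; ring
      rw [this, PySem.List.pyRange_one_succ_right (by positivity)]
    have hnn' : ∀ k : Nat, k < n → 0 ≤ intAt ts (k : Int) x := fun k hk => hnn k (by omega)
    have ha : 0 ≤ intAt ts (n : Int) x := hnn n (by omega)
    have hM : maxAbove ts x ((n + 1 : Nat) : Int) =
        if maxAbove ts x (n : Int) < intAt ts (n : Int) x then intAt ts (n : Int) x
        else maxAbove ts x (n : Int) := by
      simp only [maxAbove]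
      rw [show ((n + 1 : Nat) : Int) = (n : Int) + 1 from by push_cast; ring,
        PySem.List.pyRange_one_succ_right (by positivity), List.map_append, List.map_cons,
        List.map_nil, maxD_append_singleton _ _ (by omega)]
    rw [hsplit, List.foldl_append, List.foldl_append, List.foldl_cons, List.foldl_nil,
        List.foldl_cons, List.foldl_nil, ih hnn' s, hM]
    simp only [gt_iff_lt]
    split_ifs <;> rfl

-- a conditional Set.add fold is a plain Set.add fold over the filtered, mapped index list
theorem foldl_cond_add (x : Int) (p : Int → Bool) (l : List Int) :
    ∀ s : PySem.Set (Int × Int),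
    l.foldl (fun (s : PySem.Set (Int × Int)) y => if p y then PySem.Set.add s (x, y) else s) s
      = List.foldl PySem.Set.add s ((l.filter p).map (fun y => (x, y))) := by
  induction l with
  | nil => intro s; rfl
  | cons a t ih =>
    intro s
    by_cases hp : p a = true <;> simp [hp, ih]

-- folding Set.add over a flatMap is the fold of the per-chunk folds
theorem foldl_add_flatMap (g : Int → List (Int × Int)) (l : List Int) :
    ∀ s : PySem.Set (Int × Int),
    List.foldl PySem.Set.add s (l.flatMap g)
      = l.foldl (fun s x => List.foldl PySem.Set.add s (g x)) s := by
  induction l with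
  | nil => intro s; rfl
  | cons a t ih => intro s; simp [List.flatMap_cons, List.foldl_append, ih]

-- the digit-character bounds used for nonnegativity
theorem isDigit_toNat_bounds (c : Char) (h : c.isDigit = true) : 48 ≤ c.toNat ∧ c.toNat ≤ 57 := by
  simp [Char.isDigit] at h
  have h2 := h.1; have h3 := h.2
  exact ⟨by exact_mod_cast UInt32.le_iff_toNat_le.mp h2,
         by exact_mod_cast UInt32.le_iff_toNat_le.mp h3⟩

theorem intAt_nonneg (ts : List String) (y x : Nat)
    (h : ((ts.getD y "").toList.getD x ' ').isDigit = true) : 0 ≤ intAt ts (y : Int) (x : Int) := by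
  unfold intAt
  rw [PySem.List.pyGetD_natCast, PySem.List.pyGetD_natCast, ofChars?_digit _ h]
  have hb := (isDigit_toNat_bounds _ h).1
  simp only [Option.getD]
  omega

-- ===== VERDICT (by name: the statement is the Claim_ definition above) =====
theorem look_from_top_spec : Claim_equal_look_from_top := by
  intro ts _ hpre
  unfold Spec_look_from_top look_from_top look_from_top_alt
  obtain ⟨hne, hP⟩ := hpre
  rw [show PySem.Set.union (PySem.Set.ofList [((0 : Int), (0 : Int))]) _
      = List.foldl PySem.Set.add (PySem.Set.ofList [((0 : Int), (0 : Int))]) _ from rfl,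
    foldl_add_flatMap]
  apply PySem.List.foldl_congr_mem
  intro acc x hx
  rw [PySem.List.mem_pyRange_one] at hx
  obtain ⟨hx0, hxW⟩ := hx
  obtain ⟨k, rfl⟩ : ∃ k : Nat, x = (k : Int) := ⟨x.toNat, (Int.toNat_of_nonneg hx0).symm⟩
  rw [PySem.List.pyGetD_zero, PySem.Str.len_eq] at hxW
  have hk : k < (ts.getD 0 "").toList.length := by exact_mod_cast hxW
  obtain ⟨hkts, hin⟩ := hP k hk
  have hrow : PySem.Str.len (PySem.List.pyGetD ts (k : Int) "")
      = (((ts.getD k "").toList.length : Nat) : Int) := by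
    rw [PySem.List.pyGetD_natCast, PySem.Str.len_eq]
  rw [hrow]
  have hnn : ∀ j : Nat, j < (ts.getD k "").toList.length → 0 ≤ intAt ts (j : Int) (k : Int) := by
    intro j hj
    obtain ⟨_, _, hdig⟩ := hin j hj
    exact intAt_nonneg ts j k hdig
  rw [inner_loop ts (k : Int) _ hnn acc, ← foldl_cond_add]
  simp only [decide_eq_true_eq]
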